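-- pv_equiv track=rewrite | github.com/LaxenOsund/Advent-Of-Code-2025 | Day6/day6.py | solve
-- ===== SOURCE A (Python) =====
-- def solve(data):
--     result = 0
--     for col in range(len(data[0])):
--         operator = data[-1][col]
--         if operator == "*":
--             result += multiplication(data,col)
--         else:
--             result +=addition(data,col)
--     return result
--
-- def addition(data,col):
--     col_res = 0
--     for row in range(len(data)-1):
--         col_res +=int(data[row][col])
--     return col_res
--
-- def multiplication(data,col):
--     col_res = 1
--     for row in range(len(data)-1):
--         col_res *=int(data[row][col])
--     return col_res
-- ===== SOURCE B (Python) =====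
-- def solve(data):
--     ops = data[-1]
--     width = len(data[0])
--     acc = [1 if ops[c] == "*" else 0 for c in range(width)]
--     for r in range(len(data) - 1):
--         row = data[r]
--         for c in range(width):
--             if ops[c] == "*":
--                 acc[c] *= int(row[c])
--             else:
--                 acc[c] += int(row[c])
--     return sum(acc)
-- ===== Notes on version B (the rewrite author's own statement) =====
-- stated objective: alternative
-- what changed: Replaces A's column-outer traversal with two per-column helper passes by a single row-outer sweep that maintains one accumulator per column (0 for '+', 1 for '*') and sums the accumulators at the end.
import Mathlib
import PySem

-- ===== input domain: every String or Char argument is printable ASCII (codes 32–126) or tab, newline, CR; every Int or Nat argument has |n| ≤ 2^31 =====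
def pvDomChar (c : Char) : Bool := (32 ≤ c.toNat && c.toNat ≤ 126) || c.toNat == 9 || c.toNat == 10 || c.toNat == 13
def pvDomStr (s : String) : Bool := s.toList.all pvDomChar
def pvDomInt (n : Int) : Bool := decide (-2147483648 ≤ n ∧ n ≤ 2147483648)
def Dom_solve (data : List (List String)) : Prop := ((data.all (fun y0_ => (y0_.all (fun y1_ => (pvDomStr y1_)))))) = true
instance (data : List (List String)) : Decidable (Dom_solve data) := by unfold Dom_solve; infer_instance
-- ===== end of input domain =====

-- B reorganises the traversal: instead of A's column-outer loop calling a per-column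
-- addition/multiplication helper, B makes one row-outer sweep maintaining a per-column
-- accumulator list (init 0 for '+', 1 for '*') and sums the accumulators at the end.

-- ===== PORT A =====
-- int(data[row][col]); total form, exact under Pre_solve (parse succeeds there)
def pvCell (data : List (List String)) (row col : Nat) : Int :=
  (PySem.Int.ofStr? ((data.getD row []).getD col "")).getD 0

-- helper addition(data, col)
def pvAddition (data : List (List String)) (col : Nat) : Int :=
  (List.range (data.length - 1)).foldl (fun a row => a + pvCell data row col) 0

-- helper multiplication(data, col)
def pvMultiplication (data : List (List String)) (col : Nat) : Int :=
  (List.range (data.length - 1)).foldl (fun a row => a * pvCell data row col) 1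

def solve (data : List (List String)) : Int :=
  -- data[-1] and len(data[0]); total forms, exact under Pre_solve (data ≠ [])
  let ops := (PySem.List.pyGet? data (-1)).getD []
  (List.range ((PySem.List.pyGet? data 0).getD []).length).foldl
    (fun result col =>
      if ops.getD col "" = "*" then result + pvMultiplication data col
      else result + pvAddition data col) 0

-- ===== PORT B =====
def solve_alt (data : List (List String)) : Int :=
  let ops := (PySem.List.pyGet? data (-1)).getD []
  let width := ((PySem.List.pyGet? data 0).getD []).length
  let init : List Int := (List.range width).map (fun c => if ops.getD c "" = "*" then 1 else 0)
  let acc := (List.range (data.length - 1)).foldl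
    (fun acc r =>
      let row := data.getD r []
      (List.range width).foldl
        (fun acc c =>
          if ops.getD c "" = "*" then
            acc.set c (acc.getD c 0 * (PySem.Int.ofStr? (row.getD c "")).getD 0)
          else
            acc.set c (acc.getD c 0 + (PySem.Int.ofStr? (row.getD c "")).getD 0)) acc)
    init
  acc.foldl (· + ·) 0

-- ===== PRECONDITION & SPEC =====
-- Pre_solve is exactly where A returns: data nonempty, every row at least as long as
-- data[0] (indexing data[row][col] and data[-1][col] succeeds), and every accessed cell
-- of the non-operator rows parses as a Python int.
def Pre_solve (data : List (List String)) : Prop :=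
  data ≠ [] ∧
  (∀ row ∈ data, (data.headD []).length ≤ row.length) ∧
  (∀ row ∈ data.dropLast, ∀ s ∈ row.take (data.headD []).length,
    (PySem.Int.ofStr? s).isSome = true)
instance (data : List (List String)) : Decidable (Pre_solve data) := by
  unfold Pre_solve; infer_instance

def pvWitness_solve : List (List String) := [["1", "2"], ["3", "4"], ["+", "*"]]

def Spec_solve (data : List (List String)) (out : Int) : Prop := out = solve_alt data
instance (data : List (List String)) (out : Int) : Decidable (Spec_solve data out) := by
  unfold Spec_solve; infer_instance

-- ===== CLAIM (what is proved, stated in full; the proofs are below) =====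
def Claim_equal_solve : Prop :=
  ∀ (data : List (List String)), Dom_solve data → Pre_solve data → Spec_solve data (solve data)

-- ===== LEMMAS AND PROOFS =====

-- proof-only helper: the inner (per-row) column sweep, abstracted
def pvStep (upd : Nat → Int → Int) (w : Nat) (acc : List Int) : List Int :=
  (List.range w).foldl (fun a c => a.set c (upd c (a.getD c 0))) acc

theorem pvStep_succ (upd : Nat → Int → Int) (w : Nat) (acc : List Int) :
    pvStep upd (w + 1) acc
      = (pvStep upd w acc).set w (upd w ((pvStep upd w acc).getD w 0)) := by
  unfold pvStep
  rw [List.range_succ, List.foldl_append]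
  simp only [List.foldl_cons, List.foldl_nil]

theorem pvStep_length (upd : Nat → Int → Int) (w : Nat) (acc : List Int) :
    (pvStep upd w acc).length = acc.length := by
  induction w with
  | zero => simp [pvStep]
  | succ w ih => rw [pvStep_succ]; simp [ih]

theorem pvStep_getD_high (upd : Nat → Int → Int) (w : Nat) (acc : List Int)
    (c : Nat) (hc : w ≤ c) : (pvStep upd w acc).getD c 0 = acc.getD c 0 := by
  induction w generalizing c with
  | zero => simp [pvStep]
  | succ w ih =>
    rw [pvStep_succ, List.getD_eq_getElem?_getD, List.getElem?_set_ne (by omega),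
      ← List.getD_eq_getElem?_getD]
    exact ih c (by omega)

theorem pvStep_getD_low (upd : Nat → Int → Int) (w : Nat) (acc : List Int)
    (c : Nat) (hc : c < w) (hlen : c < acc.length) :
    (pvStep upd w acc).getD c 0 = upd c (acc.getD c 0) := by
  induction w with
  | zero => omega
  | succ w ih =>
    rw [pvStep_succ]
    rcases Nat.lt_or_ge c w with h | h
    · rw [List.getD_eq_getElem?_getD, List.getElem?_set_ne (by omega),
        ← List.getD_eq_getElem?_getD]
      exact ih h
    · have hcw : c = w := by omega
      subst hcw
      have hl : c < (pvStep upd c acc).length := by rw [pvStep_length]; exact hlen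
      rw [List.getD_eq_getElem?_getD, List.getElem?_set_self hl, Option.getD_some,
        pvStep_getD_high upd c acc c le_rfl]

theorem pvStep_eq_map (upd : Nat → Int → Int) (w : Nat) (acc : List Int)
    (hlen : acc.length = w) :
    pvStep upd w acc = (List.range w).map (fun c => upd c (acc.getD c 0)) := by
  apply List.ext_getElem
  · rw [pvStep_length, hlen]; simp
  · intro i h1 h2
    have hi : i < w := by simpa using h2
    have hg : (pvStep upd w acc)[i] = (pvStep upd w acc).getD i 0 := by
      rw [List.getD_eq_getElem?_getD, List.getElem?_eq_getElem h1]; rfl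
    rw [hg, pvStep_getD_low upd w acc i hi (by omega)]
    simp

theorem getD_map_range_lt (f : Nat → Int) (w c : Nat) (hc : c < w) :
    ((List.range w).map f).getD c 0 = f c := by
  rw [List.getD_eq_getElem?_getD]
  simp [hc]

-- the row-outer sweep of B computes, per column, exactly A's helper folds
theorem pvRowLoop_eq (e : Nat → Nat → Int) (p : Nat → Bool) (w k : Nat) :
    (List.range k).foldl
      (fun acc r => pvStep (fun c v => if p c then v * e r c else v + e r c) w acc)
      ((List.range w).map (fun c => if p c then (1 : Int) else 0))
    = (List.range w).map (fun c =>
        if p c then (List.range k).foldl (fun a r => a * e r c) 1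
        else (List.range k).foldl (fun a r => a + e r c) 0) := by
  induction k with
  | zero => simp
  | succ k ih =>
    rw [List.range_succ, List.foldl_append]
    simp only [List.foldl_cons, List.foldl_nil]
    rw [ih, pvStep_eq_map _ w _ (by simp)]
    apply List.map_congr_left
    intro c hc
    have hcw : c < w := List.mem_range.mp hc
    rw [getD_map_range_lt _ w c hcw, List.foldl_append]
    by_cases hp : p c <;> simp [hp]

-- ===== VERDICT (by name: the statement is the Claim_ definition above) =====
theorem solve_spec : Claim_equal_solve := by
  intro data _ _
  unfold Spec_solve solve solve_alt
  simp only []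
  set ops := (PySem.List.pyGet? data (-1)).getD [] with hops
  set w := ((PySem.List.pyGet? data 0).getD []).length with hw
  set e : Nat → Nat → Int :=
    fun r c => (PySem.Int.ofStr? ((data.getD r []).getD c "")).getD 0 with he
  set p : Nat → Bool := fun c => decide (ops.getD c "" = "*") with hp
  -- B's inner loop is pvStep (pull the shared `.set c` out of the if)
  have hinner : ∀ (r : Nat) (acc : List Int),
      (List.range w).foldl
        (fun acc c =>
          if ops.getD c "" = "*" then
            acc.set c (acc.getD c 0 * (PySem.Int.ofStr? ((data.getD r []).getD c "")).getD 0)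
          else
            acc.set c (acc.getD c 0 + (PySem.Int.ofStr? ((data.getD r []).getD c "")).getD 0)) acc
      = pvStep (fun c v => if p c then v * e r c else v + e r c) w acc := by
    intro r acc
    unfold pvStep
    apply PySem.List.foldl_congr_mem
    intro a x _
    simp only [hp, he, decide_eq_true_eq]
    exact (apply_ite (a.set x) _ _ _).symm
  have hinit : (List.range w).map (fun c => if ops.getD c "" = "*" then (1 : Int) else 0)
      = (List.range w).map (fun c => if p c then (1 : Int) else 0) := by
    simp [hp]
  rw [show (List.range (data.length - 1)).foldl
        (fun acc r =>
          (List.range w).foldl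
            (fun acc c =>
              if ops.getD c "" = "*" then
                acc.set c (acc.getD c 0 * (PySem.Int.ofStr? ((data.getD r []).getD c "")).getD 0)
              else
                acc.set c (acc.getD c 0 + (PySem.Int.ofStr? ((data.getD r []).getD c "")).getD 0)) acc)
        ((List.range w).map (fun c => if ops.getD c "" = "*" then (1 : Int) else 0))
      = (List.range (data.length - 1)).foldl
          (fun acc r => pvStep (fun c v => if p c then v * e r c else v + e r c) w acc)
          ((List.range w).map (fun c => if p c then (1 : Int) else 0)) by
    rw [hinit]; exact PySem.List.foldl_congr_mem _ _ _ _ (fun a x _ => hinner x a)]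
  rw [pvRowLoop_eq e p w (data.length - 1)]
  rw [List.foldl_map]
  apply PySem.List.foldl_congr_mem
  intro a c _
  unfold pvMultiplication pvAddition pvCell
  simp only [hp, he, decide_eq_true_eq]
  exact (apply_ite (a + ·) _ _ _).symm
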